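-- pv_equiv track=rewrite | github.com/Dekardfirst/tensor_autotest_course_mansurov | Вебинар 2. Числа и строки/task7/task.py | minimum_length_slice
-- ===== SOURCE A (Python) =====
-- def minimum_length_slice(first_string, second_string):
--     """Срез минимальной длины
--     :param first_string: первая строка
--     :param second_string: вторая строка
--     :return: min_slice срез минимальной длины строки second_string
--     """
--     # todo Здесь нужно написать код
--     indices = [second_string.find(char) for char in first_string]
--
--     if -1 in indices:
--         return ""
--
--     min_index = min(indices)
--     max_index = max(indices)
--
--     min_slice = second_string[min_index : max_index + 1]
--     return min_slice
-- ===== SOURCE B (Python) =====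
-- def minimum_length_slice(first_string, second_string):
--     """Min-length slice of second_string containing the first occurrence of
--     every character of first_string; single pass with a shrinking set."""
--     remaining = set(first_string)
--     positions = []
--     for i, ch in enumerate(second_string):
--         if ch in remaining:
--             positions.append(i)
--             remaining.discard(ch)
--             if not remaining:
--                 break
--     if remaining:
--         return ""
--     return second_string[min(positions):max(positions) + 1]
-- ===== Notes on version B (the rewrite author's own statement) =====
-- stated objective: faster
-- what changed: A calls second_string.find once per character of first_string (repeated full scans); B makes a single pass over second_string with a shrinking set of still-missing characters, recording each first-occurrence index and breaking early once all are found.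
import Mathlib
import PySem

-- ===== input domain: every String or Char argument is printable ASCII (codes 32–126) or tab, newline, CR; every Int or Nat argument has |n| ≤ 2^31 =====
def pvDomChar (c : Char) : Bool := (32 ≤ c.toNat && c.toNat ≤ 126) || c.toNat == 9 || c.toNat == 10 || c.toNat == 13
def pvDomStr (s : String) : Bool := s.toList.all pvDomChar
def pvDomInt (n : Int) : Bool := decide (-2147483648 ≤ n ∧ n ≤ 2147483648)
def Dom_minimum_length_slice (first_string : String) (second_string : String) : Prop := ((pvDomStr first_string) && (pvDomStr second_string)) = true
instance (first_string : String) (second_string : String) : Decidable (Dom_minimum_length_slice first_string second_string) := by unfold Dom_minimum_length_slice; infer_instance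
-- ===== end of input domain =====

-- B replaces A's per-character scans of second_string (O(|first|·|second|)) by one pass over
-- second_string with a shrinking set of still-missing characters and an early exit (objective: faster).

-- ===== PORT A =====
def minimum_length_slice (first_string : String) (second_string : String) : String :=
  let indices := first_string.toList.map (fun c => PySem.Str.find second_string (String.ofList [c]))
  if (-1 : Int) ∈ indices then ""
  else
    match PySem.List.min? indices (fun x => x), PySem.List.max? indices (fun x => x) with
    | some min_index, some max_index =>
        PySem.Str.slice second_string (some min_index) (some (max_index + 1))
    | _, _ => ""  -- unreachable under Pre_: min([]) raises ValueError (first_string = "")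

-- ===== PORT B =====
-- the for-loop of Source B, with its early break once no character remains to be found
def pvAltLoop : List (Int × Char) → List Char → List Int → (List Char × List Int)
  | [], remaining, positions => (remaining, positions)
  | (i, ch) :: rest, remaining, positions =>
      if PySem.Set.contains remaining ch then
        let positions' := positions ++ [i]
        let remaining' := PySem.Set.discard remaining ch
        if remaining'.isEmpty then (remaining', positions')
        else pvAltLoop rest remaining' positions'
      else pvAltLoop rest remaining positions

def minimum_length_slice_alt (first_string : String) (second_string : String) : String :=
  let res := pvAltLoop (PySem.List.enumerate second_string.toList 0)
               (PySem.Set.ofList first_string.toList) []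
  if res.1.isEmpty then
    match PySem.List.min? res.2 (fun x => x) with
    | none => ""  -- unreachable under Pre_: min(positions) raises ValueError (first_string = "")
    | some mn =>
        match PySem.List.max? res.2 (fun x => x) with
        | none => ""
        | some mx => PySem.Str.slice second_string (some mn) (some (mx + 1))
  else ""

-- ===== PRECONDITION & SPEC =====
-- Pre_ excludes only first_string = "", on which A raises ValueError via min([]) (and B does too).
def Pre_minimum_length_slice (first_string : String) (second_string : String) : Prop :=
  first_string ≠ ""
instance (first_string : String) (second_string : String) : Decidable (Pre_minimum_length_slice first_string second_string) := by unfold Pre_minimum_length_slice; infer_instance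

def pvWitness_minimum_length_slice : String × String := ("ab", "cabra")

def Spec_minimum_length_slice (first_string : String) (second_string : String) (out : String) : Prop := out = minimum_length_slice_alt first_string second_string
instance (first_string : String) (second_string : String) (out : String) : Decidable (Spec_minimum_length_slice first_string second_string out) := by unfold Spec_minimum_length_slice; infer_instance

-- ===== CLAIM (what is proved, stated in full; the proofs are below) =====
def Claim_equal_minimum_length_slice : Prop := ∀ (first_string : String) (second_string : String), Dom_minimum_length_slice first_string second_string → Pre_minimum_length_slice first_string second_string → Spec_minimum_length_slice first_string second_string (minimum_length_slice first_string second_string)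

-- ===== LEMMAS AND PROOFS =====

-- proof-side ghost: pvAltLoop without the accumulator and without the break
def pvGloop : List (Int × Char) → List Char → (List Char × List Int)
  | [], rem => (rem, [])
  | (i, ch) :: rest, rem =>
      if ch ∈ rem then
        let r := pvGloop rest (PySem.Set.discard rem ch)
        (r.1, i :: r.2)
      else pvGloop rest rem

theorem pvGloop_empty (es : List (Int × Char)) : pvGloop es [] = ([], []) := by
  induction es with
  | nil => rfl
  | cons p rest ih => obtain ⟨i, ch⟩ := p; simpa [pvGloop] using ih

theorem pvAltLoop_eq_gloop (es : List (Int × Char)) :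
    ∀ (rem : List Char) (pos : List Int),
      pvAltLoop es rem pos = ((pvGloop es rem).1, pos ++ (pvGloop es rem).2) := by
  induction es with
  | nil => intro rem pos; simp [pvAltLoop, pvGloop]
  | cons p rest ih =>
      obtain ⟨i, ch⟩ := p
      intro rem pos
      by_cases h : ch ∈ rem
      · by_cases he : (PySem.Set.discard rem ch).isEmpty
        · have hnil : PySem.Set.discard rem ch = [] := by simpa using he
          simp [pvAltLoop, pvGloop, h, hnil, pvGloop_empty]
        · simp [pvAltLoop, pvGloop, h, he, ih]
      · simp [pvAltLoop, pvGloop, h, ih]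

theorem pvGloop_rem_nil_iff (es : List (Int × Char)) :
    ∀ rem : List Char, (pvGloop es rem).1 = [] ↔ ∀ c ∈ rem, c ∈ es.map Prod.snd := by
  induction es with
  | nil => intro rem; simp [pvGloop, List.eq_nil_iff_forall_not_mem]
  | cons p rest ih =>
      obtain ⟨i, ch⟩ := p
      intro rem
      by_cases h : ch ∈ rem
      · simp only [pvGloop, if_pos h, List.map_cons, List.mem_cons]
        rw [ih]
        constructor
        · intro H c hc
          by_cases hcc : c = ch
          · exact Or.inl hcc
          · exact Or.inr (H c ((PySem.Set.mem_discard rem ch c).mpr ⟨hc, hcc⟩))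
        · intro H c hc
          obtain ⟨hc1, hc2⟩ := (PySem.Set.mem_discard rem ch c).mp hc
          rcases H c hc1 with h1 | h1
          · exact absurd h1 hc2
          · exact h1
      · simp only [pvGloop, if_neg h, List.map_cons, List.mem_cons]
        rw [ih]
        constructor
        · intro H c hc; exact Or.inr (H c hc)
        · intro H c hc
          rcases H c hc with h1 | h1
          · exact absurd (h1 ▸ hc) h
          · exact h1

theorem pvGloop_pos_mem (l : List Char) :
    ∀ (k : Nat) (rem : List Char) (j : Int),
      j ∈ (pvGloop (PySem.List.enumerate l (k : Int)) rem).2 ↔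
        ∃ (n : Nat) (h : n < l.length), j = ((k : Int) + n) ∧ l[n] ∈ rem ∧ l[n] ∉ l.take n := by
  induction l with
  | nil => intro k rem j; simp [PySem.List.enumerate_nil, pvGloop]
  | cons x xs ih =>
      intro k rem j
      rw [PySem.List.enumerate_cons]
      have hk1 : ((k : Int) + 1) = ((k + 1 : Nat) : Int) := by push_cast; ring
      by_cases h : x ∈ rem
      · simp only [pvGloop, if_pos h, List.mem_cons]
        rw [hk1, ih (k+1) (PySem.Set.discard rem x) j]
        constructor
        · rintro (rfl | ⟨n, hn, rfl, hmem, htake⟩)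
          · exact ⟨0, by simp, by simp, by simpa using h, by simp⟩
          · obtain ⟨hm1, hm2⟩ := (PySem.Set.mem_discard rem x xs[n]).mp hmem
            refine ⟨n+1, by simpa using Nat.succ_lt_succ hn, by push_cast; ring, by simpa using hm1, ?_⟩
            simp only [List.take_succ_cons, List.mem_cons, List.getElem_cons_succ]
            push_neg
            exact ⟨hm2, htake⟩
        · rintro ⟨n, hn, rfl, hmem, htake⟩
          cases n with
          | zero => left; simp
          | succ m =>
              right
              simp only [List.getElem_cons_succ] at hmem
              simp only [List.take_succ_cons, List.mem_cons, List.getElem_cons_succ] at htake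
              push_neg at htake
              refine ⟨m, by simpa using hn, by push_cast; ring, ?_, htake.2⟩
              exact (PySem.Set.mem_discard rem x (xs[m]'(by simpa using hn))).mpr ⟨hmem, htake.1⟩
      · simp only [pvGloop, if_neg h]
        rw [hk1, ih (k+1) rem j]
        constructor
        · rintro ⟨n, hn, rfl, hmem, htake⟩
          have hne : xs[n] ≠ x := fun he => h (he ▸ hmem)
          refine ⟨n+1, by simpa using Nat.succ_lt_succ hn, by push_cast; ring, by simpa using hmem, ?_⟩
          simp only [List.take_succ_cons, List.mem_cons, List.getElem_cons_succ]
          push_neg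
          exact ⟨hne, htake⟩
        · rintro ⟨n, hn, rfl, hmem, htake⟩
          cases n with
          | zero => exact absurd (by simpa using hmem) h
          | succ m =>
              simp only [List.getElem_cons_succ] at hmem
              simp only [List.take_succ_cons, List.mem_cons, List.getElem_cons_succ] at htake
              push_neg at htake
              exact ⟨m, by simpa using hn, by push_cast; ring, hmem, htake.2⟩

theorem pv_singleton_prefix_iff (c : Char) (t : List Char) :
    [c] <+: t ↔ t.head? = some c := by
  cases t with
  | nil => simp
  | cons x xs => simp [List.cons_prefix_cons, eq_comm]

theorem pv_find_neg_one_iff (l : List Char) (c : Char) :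
    PySem.Chars.find l [c] = -1 ↔ c ∉ l := by
  rw [PySem.Chars.find_eq_neg_one_iff]
  rw [← PySem.Chars.isIn_iff_infix, ← PySem.Chars.exists_prefix_drop_iff_isIn]
  simp only [pv_singleton_prefix_iff, List.head?_drop]
  simp [List.mem_iff_getElem?, eq_comm]

theorem pv_find_spec_single (l : List Char) (c : Char) (hc : c ∈ l) :
    ∃ (n : Nat) (h : n < l.length),
      PySem.Chars.find l [c] = (n : Int) ∧ l[n] = c ∧ c ∉ l.take n := by
  have hne : PySem.Chars.find l [c] ≠ -1 := fun h => (pv_find_neg_one_iff l c).mp h hc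
  have hge := PySem.Chars.neg_one_le_find l [c]
  have hnn : 0 ≤ PySem.Chars.find l [c] := by omega
  obtain ⟨hpre, hmin⟩ := PySem.Chars.find_spec hnn
  set n := (PySem.Chars.find l [c]).toNat with hn
  have heq : PySem.Chars.find l [c] = (n : Int) := (Int.toNat_of_nonneg hnn).symm
  have hh : (l.drop n).head? = some c := (pv_singleton_prefix_iff c _).mp hpre
  rw [List.head?_drop] at hh
  have hlt : n < l.length := by
    by_contra hge2
    rw [List.getElem?_eq_none (by omega)] at hh
    simp at hh
  refine ⟨n, hlt, heq, ?_, ?_⟩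
  · rw [List.getElem?_eq_getElem hlt] at hh
    exact Option.some.inj hh
  · intro hmemtake
    obtain ⟨i, hi, hieq⟩ := List.getElem_of_mem hmemtake
    have hi' : i < n := by simp [List.length_take] at hi; omega
    have hil : i < l.length := by simp [List.length_take] at hi; omega
    apply hmin i hi'
    rw [pv_singleton_prefix_iff, List.head?_drop, List.getElem?_eq_getElem hil]
    rw [List.getElem_take] at hieq
    exact congrArg some hieq

theorem pv_find_eq_of_first (l : List Char) (c : Char) (n : Nat) (h : n < l.length)
    (h1 : l[n] = c) (h2 : c ∉ l.take n) : PySem.Chars.find l [c] = (n : Int) := by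
  have hmemtk : ∀ (a b : Nat), a < b → ∀ (ha : a < l.length), l[a] ∈ l.take b := by
    intro a b hab ha
    have hlen : a < (l.take b).length := by simp [List.length_take]; omega
    have : (l.take b)[a] = l[a] := List.getElem_take
    exact this ▸ List.getElem_mem hlen
  have hc : c ∈ l := h1 ▸ List.getElem_mem h
  obtain ⟨m, hm, heq, hm1, hm2⟩ := pv_find_spec_single l c hc
  rw [heq]
  have : m = n := by
    rcases Nat.lt_trichotomy m n with hlt | he | hgt
    · exact absurd (by rw [← hm1]; exact hmemtk m n hlt hm) h2
    · exact he
    · exact absurd (by rw [← h1]; exact hmemtk n m hgt h) hm2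
  rw [this]

theorem pv_min_congr (xs ys : List Int) (hxs : xs ≠ []) (hys : ys ≠ [])
    (h : ∀ a, a ∈ xs ↔ a ∈ ys) :
    PySem.List.min? xs (fun x => x) = PySem.List.min? ys (fun x => x) := by
  cases hx : PySem.List.min? xs (fun x => x) with
  | none => exact absurd ((PySem.List.min?_eq_none_iff xs _).mp hx) hxs
  | some mx =>
    cases hy : PySem.List.min? ys (fun x => x) with
    | none => exact absurd ((PySem.List.min?_eq_none_iff ys _).mp hy) hys
    | some my =>
      have h1 := PySem.List.min?_isMin hy mx ((h mx).mp (PySem.List.min?_mem hx))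
      have h2 := PySem.List.min?_isMin hx my ((h my).mpr (PySem.List.min?_mem hy))
      exact congrArg some (le_antisymm h2 h1)

theorem pv_max_congr (xs ys : List Int) (hxs : xs ≠ []) (hys : ys ≠ [])
    (h : ∀ a, a ∈ xs ↔ a ∈ ys) :
    PySem.List.max? xs (fun x => x) = PySem.List.max? ys (fun x => x) := by
  cases hx : PySem.List.max? xs (fun x => x) with
  | none => exact absurd ((PySem.List.max?_eq_none_iff xs _).mp hx) hxs
  | some mx =>
    cases hy : PySem.List.max? ys (fun x => x) with
    | none => exact absurd ((PySem.List.max?_eq_none_iff ys _).mp hy) hys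
    | some my =>
      have h1 := PySem.List.max?_isMax hy mx ((h mx).mp (PySem.List.max?_mem hx))
      have h2 := PySem.List.max?_isMax hx my ((h my).mpr (PySem.List.max?_mem hy))
      exact congrArg some (le_antisymm h1 h2)

-- ===== VERDICT (by name: the statement is the Claim_ definition above) =====
theorem minimum_length_slice_spec : Claim_equal_minimum_length_slice := by
  intro fs ss _ hpre
  show minimum_length_slice fs ss = minimum_length_slice_alt fs ss
  have hfl : fs.toList ≠ [] := by
    intro h
    exact hpre (String.toList_eq_nil_iff.mp h)
  unfold minimum_length_slice minimum_length_slice_alt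
  rw [pvAltLoop_eq_gloop]
  simp only [PySem.Str.find_eq, String.toList_ofList, List.nil_append]
  set l := ss.toList with hldef
  set fl := fs.toList with hfldef
  set idx := fl.map (fun c => PySem.Chars.find l [c]) with hidx
  set res := pvGloop (PySem.List.enumerate l 0) (PySem.Set.ofList fl) with hres
  have hpm : ∀ j : Int, j ∈ res.2 ↔
      ∃ (n : Nat) (hn : n < l.length), j = (n : Int) ∧ l[n] ∈ PySem.Set.ofList fl ∧ l[n] ∉ l.take n := by
    intro j
    have := pvGloop_pos_mem l 0 (PySem.Set.ofList fl) j
    simpa [hres] using this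
  have hsnd : (PySem.List.enumerate l 0).map Prod.snd = l := by
    simp [PySem.List.map_snd_enumerate l 0]
  by_cases hmiss : (-1 : Int) ∈ idx
  · have hBne : res.1 ≠ [] := by
      intro hnil
      obtain ⟨c, hcfl, hcfind⟩ := List.mem_map.mp hmiss
      have hcnot : c ∉ l := (pv_find_neg_one_iff l c).mp hcfind
      have := (pvGloop_rem_nil_iff _ _).mp hnil c ((PySem.Set.mem_ofList fl c).mpr hcfl)
      rw [hsnd] at this
      exact hcnot this
    have hBemp : res.1.isEmpty = false := by
      cases hE : res.1.isEmpty
      · rfl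
      · exact absurd (List.isEmpty_iff.mp hE) hBne
    simp [hmiss, hBemp]
  · have hall : ∀ c ∈ fl, c ∈ l := by
      intro c hc
      by_contra hnc
      exact hmiss (List.mem_map.mpr ⟨c, hc, (pv_find_neg_one_iff l c).mpr hnc⟩)
    have hBnil : res.1 = [] := by
      apply (pvGloop_rem_nil_iff _ _).mpr
      intro c hcm
      rw [hsnd]
      exact hall c ((PySem.Set.mem_ofList fl c).mp hcm)
    have hmemiff : ∀ j : Int, j ∈ idx ↔ j ∈ res.2 := by
      intro j
      constructor
      · intro hj
        obtain ⟨c, hc, hceq⟩ := List.mem_map.mp hj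
        obtain ⟨n, hn, hfindn, hln, htk⟩ := pv_find_spec_single l c (hall c hc)
        refine (hpm j).mpr ⟨n, hn, by rw [← hceq, hfindn], ?_, ?_⟩
        · rw [hln]; exact (PySem.Set.mem_ofList fl c).mpr hc
        · rw [hln]; exact htk
      · intro hj
        obtain ⟨n, hn, rfl, hmem, htk⟩ := (hpm j).mp hj
        refine List.mem_map.mpr ⟨l[n], (PySem.Set.mem_ofList fl _).mp hmem, ?_⟩
        exact pv_find_eq_of_first l (l[n]'hn) n hn rfl htk
    have hidxne : idx ≠ [] := by
      intro h
      rw [hidx, List.map_eq_nil_iff] at h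
      exact hfl h
    have hposne : res.2 ≠ [] := by
      obtain ⟨c, hc⟩ := List.exists_mem_of_ne_nil fl hfl
      have hmi : PySem.Chars.find l [c] ∈ idx := List.mem_map.mpr ⟨c, hc, rfl⟩
      exact List.ne_nil_of_mem ((hmemiff _).mp hmi)
    have hmin := pv_min_congr idx res.2 hidxne hposne hmemiff
    have hmax := pv_max_congr idx res.2 hidxne hposne hmemiff
    have hBemp : res.1.isEmpty = true := by simp [hBnil]
    simp only [hmiss, if_false, hBemp, if_true]
    rw [← hmin, ← hmax]
    cases hmn : PySem.List.min? idx (fun x => x) <;>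
      cases hmx : PySem.List.max? idx (fun x => x) <;> rfl
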